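-- pv_equiv track=rewrite | github.com/ALXS-GitHub/Advent-Of-Code | Advent-of-Code-2022/day06/day6.py | find_message_marker_id
-- ===== SOURCE A (Python) =====
-- def find_message_marker_id(line:str)->int:
--     """ trouve le nombre de caractères avant le message marker
--
--     Args:
--         line (str): signal
--
--     Returns:
--         int: index
--     """
--
--     max_id = len(line)
--
--     if max_id < 13: # si le signal est de longueur inférieure à 14
--         return -1
--
--     for i in range(13,max_id):
--
--         last_14 = sorted(line[i-13:i+1])
--
--         last_14_unique = sorted(set(last_14))
--
--         if last_14 == last_14_unique:
--             return i + 1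
--
--     return -1
-- ===== SOURCE B (Python) =====
-- def find_message_marker_id(line: str) -> int:
--     """Single-pass sliding window: track each char's last-seen index and a
--     window-start pointer; return i+1 as soon as the window of distinct
--     characters ending at i reaches length 14, else -1."""
--     last = {}
--     start = 0
--     for i, c in enumerate(line):
--         j = last.get(c, -1)
--         if j >= start:
--             start = j + 1
--         last[c] = i
--         if i - start + 1 == 14:
--             return i + 1
--     return -1
-- ===== Notes on version B (the rewrite author's own statement) =====
-- stated objective: faster
-- what changed: Replaced the per-index re-sort of each 14-char window (sorted window vs sorted set) by a single-pass two-pointer sliding window that keeps each character's last-seen index in a dict and advances a window-start pointer.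
import Mathlib
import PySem

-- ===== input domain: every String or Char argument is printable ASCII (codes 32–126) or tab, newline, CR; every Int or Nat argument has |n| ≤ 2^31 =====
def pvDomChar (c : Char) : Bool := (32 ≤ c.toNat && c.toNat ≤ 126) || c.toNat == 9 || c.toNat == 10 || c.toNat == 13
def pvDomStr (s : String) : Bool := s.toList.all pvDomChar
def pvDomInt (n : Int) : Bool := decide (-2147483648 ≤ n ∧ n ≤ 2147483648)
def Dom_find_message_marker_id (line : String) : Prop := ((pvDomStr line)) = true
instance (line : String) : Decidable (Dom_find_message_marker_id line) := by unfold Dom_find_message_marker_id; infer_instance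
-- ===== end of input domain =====

-- B replaces A's per-index re-sort of every 14-char window by a one-pass two-pointer
-- sliding window with a last-seen-index dict (objective: faster by a constant factor).

-- ===== PORT A =====
-- the 'for i in range(13, max_id)' loop with its early return
def pvA_loop (cs : List Char) : List Int → Int
  | [] => -1
  | i :: rest =>
    let last_14 := PySem.List.sorted (PySem.List.slice cs (some (i - 13)) (some (i + 1))) (fun x => x) false
    let last_14_unique := PySem.List.sorted (PySem.Set.ofList last_14) (fun x => x) false
    if last_14 = last_14_unique then i + 1 else pvA_loop cs rest

def find_message_marker_id (line : String) : Int :=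
  let max_id : Int := PySem.Str.len line
  if max_id < 13 then -1
  else pvA_loop line.toList (PySem.List.pyRange 13 max_id 1)

-- ===== PORT B =====
-- the 'for i, c in enumerate(line)' loop with its early return
def pvB_loop : List (Int × Char) → PySem.Dict Char Int → Int → Int
  | [], _, _ => -1
  | (i, c) :: rest, last, start =>
    let j := last.getD c (-1)
    let start' := if start ≤ j then j + 1 else start
    let last' := last.insert c i
    if i - start' + 1 = 14 then i + 1 else pvB_loop rest last' start'

def find_message_marker_id_alt (line : String) : Int :=
  pvB_loop (PySem.List.enumerate line.toList 0) PySem.Dict.empty 0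

-- ===== PRECONDITION & SPEC =====
def Spec_find_message_marker_id (line : String) (out : Int) : Prop := out = find_message_marker_id_alt line
instance (line : String) (out : Int) : Decidable (Spec_find_message_marker_id line out) := by unfold Spec_find_message_marker_id; infer_instance

-- ===== CLAIM (what is proved, stated in full; the proofs are below) =====
def Claim_equal_find_message_marker_id : Prop := ∀ (line : String), Dom_find_message_marker_id line → Spec_find_message_marker_id line (find_message_marker_id line)

-- ===== LEMMAS AND PROOFS =====

-- reference function: first index k with a duplicate-free 14-char window ending at k, +1; else -1
def pvFirst (cs : List Char) (k : Nat) : Int :=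
  if _h : k < cs.length then
    if 13 ≤ k ∧ ((cs.take (k+1)).drop (k - 13)).Nodup then (k : Int) + 1
    else pvFirst cs (k+1)
  else -1
termination_by cs.length - k

-- A's window test (sorted window = sorted set of the sorted window) is exactly "no duplicates"
theorem pvA_cond_iff (w : List Char) :
    (PySem.List.sorted w (fun x => x) false
      = PySem.List.sorted (PySem.Set.ofList (PySem.List.sorted w (fun x => x) false)) (fun x => x) false)
      ↔ w.Nodup := by
  constructor
  · intro h
    have hnd : (PySem.List.sorted w (fun x => x) false).Nodup := by
      rw [h]
      exact (PySem.List.sorted_perm _ (fun x : Char => x) false).symm.nodup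
        (PySem.Set.nodup_ofList _)
    exact (PySem.List.sorted_perm w (fun x : Char => x) false).nodup hnd
  · intro h
    have ht : (PySem.List.sorted w (fun x => x) false).Nodup :=
      (PySem.List.sorted_perm w (fun x : Char => x) false).symm.nodup h
    rw [PySem.Set.ofList_eq_self_of_nodup _ ht, PySem.List.sorted_sorted]

-- A's slice at index k is the window of pvFirst
theorem pvA_window (cs : List Char) (k : Nat) (hk : 13 ≤ k) :
    PySem.List.slice cs (some ((k : Int) - 13)) (some ((k : Int) + 1))
      = (cs.take (k+1)).drop (k - 13) := by
  have h13 : ((k : Int) - 13) = ((k - 13 : Nat) : Int) := by omega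
  have h1 : ((k : Int) + 1) = ((k + 1 : Nat) : Int) := by push_cast; ring
  rw [h13, h1, PySem.List.slice_natCast, List.drop_take]

theorem pvA_loop_eq (cs : List Char) (m : Nat) :
    ∀ (k : Nat), cs.length ≤ k + m → 13 ≤ k →
    pvA_loop cs (PySem.List.pyRange (k : Int) (cs.length : Int) 1) = pvFirst cs k := by
  induction m with
  | zero =>
    intro k hm hk
    rw [PySem.List.pyRange_one_eq_nil (by exact_mod_cast hm), pvA_loop, pvFirst,
      dif_neg (by omega)]
  | succ m ih =>
    intro k hm hk
    by_cases h : k < cs.length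
    · rw [PySem.List.pyRange_one_cons (by exact_mod_cast h)]
      rw [pvA_loop, pvFirst, dif_pos h]
      simp only [pvA_window cs k hk]
      by_cases hc : ((cs.take (k+1)).drop (k - 13)).Nodup
      · rw [if_pos ((pvA_cond_iff _).mpr hc), if_pos ⟨hk, hc⟩]
      · rw [if_neg (fun hh => hc ((pvA_cond_iff _).mp hh)), if_neg (fun hh => hc hh.2)]
        have hcast : ((k : Int) + 1) = ((k + 1 : Nat) : Int) := by push_cast; ring
        rw [hcast, ih (k+1) (by omega) (by omega)]
    · rw [PySem.List.pyRange_one_eq_nil (by exact_mod_cast Nat.le_of_not_lt h), pvA_loop,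
        pvFirst, dif_neg h]

theorem pvFirst_short (cs : List Char) (hn : cs.length < 13) (m : Nat) :
    ∀ (k : Nat), cs.length ≤ k + m → pvFirst cs k = -1 := by
  induction m with
  | zero =>
    intro k hm
    rw [pvFirst, dif_neg (by omega)]
  | succ m ih =>
    intro k hm
    rw [pvFirst]
    by_cases h : k < cs.length
    · rw [dif_pos h, if_neg (fun hh => absurd hh.1 (by omega))]
      exact ih (k+1) (by omega)
    · rw [dif_neg h]

theorem pvFirst_start (cs : List Char) (hn : 13 ≤ cs.length) (m : Nat) :
    ∀ (k : Nat), 13 ≤ k + m → k ≤ 13 → pvFirst cs k = pvFirst cs 13 := by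
  induction m with
  | zero =>
    intro k hm hk
    have : k = 13 := by omega
    rw [this]
  | succ m ih =>
    intro k hm hk
    by_cases hke : k = 13
    · rw [hke]
    · rw [pvFirst, dif_pos (by omega), if_neg (fun hh => absurd hh.1 (by omega))]
      exact ih (k+1) (by omega) (by omega)

theorem pvA_eq (line : String) : find_message_marker_id line = pvFirst line.toList 0 := by
  have hlen : PySem.Str.len line = (line.toList.length : Int) := by
    simp [PySem.Str.len]
  unfold find_message_marker_id
  rw [hlen]
  by_cases h : line.toList.length < 13
  · rw [if_pos (by exact_mod_cast h), pvFirst_short line.toList h line.toList.length 0 (by omega)]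
  · have hn : 13 ≤ line.toList.length := Nat.le_of_not_lt h
    rw [if_neg (by exact_mod_cast h)]
    have h13 : (13 : Int) = ((13 : Nat) : Int) := by norm_num
    rw [h13, pvA_loop_eq line.toList line.toList.length 13 (by omega) (le_refl _),
      pvFirst_start line.toList hn 13 0 (by omega) (by omega)]

theorem pvB_loop_cons (i : Int) (c : Char) (rest : List (Int × Char))
    (last : PySem.Dict Char Int) (start : Int) :
    pvB_loop ((i, c) :: rest) last start =
      (if i - (if start ≤ last.getD c (-1) then last.getD c (-1) + 1 else start) + 1 = 14
       then i + 1
       else pvB_loop rest (last.insert c i)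
         (if start ≤ last.getD c (-1) then last.getD c (-1) + 1 else start)) := rfl

theorem pvEnum_cons (x : Char) (xs : List Char) (s : Int) :
    PySem.List.enumerate (x :: xs) s = (s, x) :: PySem.List.enumerate xs (s + 1) := by
  simp [PySem.List.enumerate]

theorem pvB_main (cs : List Char) (m : Nat) :
    ∀ (k : Nat) (last : PySem.Dict Char Int) (start : Int),
    cs.length ≤ k + m →
    0 ≤ start →
    (∀ (c : Char) (s : Nat), s ≤ k → (c ∉ (cs.take k).drop s ↔ last.getD c (-1) < (s : Int))) →
    (∀ (s : Nat), s ≤ k → (((cs.take k).drop s).Nodup ↔ start ≤ (s : Int))) →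
    (k : Int) - start ≤ 13 →
    pvB_loop (PySem.List.enumerate (cs.drop k) (k : Int)) last start = pvFirst cs k := by
  induction m with
  | zero =>
    intro k last start hm h0 h1 h2 h3
    rw [List.drop_eq_nil_of_le (by omega), pvFirst, dif_neg (by omega)]
    simp [pvB_loop, PySem.List.enumerate]
  | succ m ih =>
    intro k last start hm h0 h1 h2 h3
    by_cases h : k < cs.length
    · -- the processed character
      have hdrop : cs.drop k = cs[k] :: cs.drop (k+1) := List.drop_eq_getElem_cons h
      rw [hdrop, pvEnum_cons, pvB_loop_cons]
      set x := cs[k] with hx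
      set j := last.getD x (-1) with hj
      set S := if start ≤ j then j + 1 else start with hS
      -- basic facts
      have htakek : ((cs.take k).drop k) = ([] : List Char) :=
        List.drop_eq_nil_of_le (by simp)
      have hall : ∀ c : Char, last.getD c (-1) < (k : Int) := by
        intro c
        exact (h1 c k (le_refl k)).mp (by rw [htakek]; exact List.not_mem_nil)
      have hstart_k : start ≤ (k : Int) := (h2 k (le_refl k)).mp (by rw [htakek]; exact List.nodup_nil)
      have hjk : j < (k : Int) := by rw [hj]; exact hall x
      have hS0 : 0 ≤ S := by rw [hS]; split <;> omega
      have hSk : S ≤ (k : Int) := by rw [hS]; split <;> omega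
      have hSlb : (k : Int) - 13 ≤ S := by rw [hS]; split <;> omega
      have htake : cs.take (k+1) = cs.take k ++ [x] := by
        rw [List.take_add_one, List.getElem?_eq_getElem h]; rfl
      have hdrops : ∀ s : Nat, s ≤ k →
          (cs.take (k+1)).drop s = (cs.take k).drop s ++ [x] := by
        intro s hs
        rw [htake, List.drop_append_of_le_length (by rw [List.length_take]; omega)]
      have hdropk1 : (cs.take (k+1)).drop (k+1) = ([] : List Char) :=
        List.drop_eq_nil_of_le (by simp)
      -- new invariants for k+1
      have new1 : ∀ (c : Char) (s : Nat), s ≤ k + 1 →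
          (c ∉ (cs.take (k+1)).drop s ↔ (last.insert x (k : Int)).getD c (-1) < (s : Int)) := by
        intro c s hs
        rw [PySem.Dict.getD_insert]
        by_cases hcx : c = x
        · rw [if_pos hcx]
          rcases Nat.lt_or_ge s (k+1) with hsk | hsk
          · have hxmem : c ∈ (cs.take (k+1)).drop s := by
              rw [hdrops s (by omega), hcx]
              exact List.mem_append_right _ (List.mem_singleton_self x)
            constructor
            · intro hmem; exact absurd hxmem hmem
            · intro hlt; exfalso; omega
          · have hsk1 : s = k + 1 := by omega
            rw [hsk1, hdropk1]
            simp only [List.not_mem_nil, not_false_iff, true_iff]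
            omega
        · rw [if_neg hcx]
          rcases Nat.lt_or_ge s (k+1) with hsk | hsk
          · rw [hdrops s (by omega), ← h1 c s (by omega)]
            constructor
            · intro hmem hin
              exact hmem (List.mem_append_left _ hin)
            · intro hnin hor
              rcases List.mem_append.mp hor with hin | heq
              · exact hnin hin
              · exact hcx (List.mem_singleton.mp heq)
          · have hsk1 : s = k + 1 := by omega
            rw [hsk1, hdropk1]
            simp only [List.not_mem_nil, not_false_iff, true_iff]
            have := hall c
            omega
      have new2 : ∀ (s : Nat), s ≤ k + 1 →
          (((cs.take (k+1)).drop s).Nodup ↔ S ≤ (s : Int)) := by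
        intro s hs
        rcases Nat.lt_or_ge s (k+1) with hsk | hsk
        · have hss : s ≤ k := by omega
          rw [hdrops s hss]
          have hx1 := h1 x s hss
          rw [← hj] at hx1
          have h2' := h2 s hss
          constructor
          · intro hnd
            rcases List.nodup_append.mp hnd with ⟨hn1, -, hdisj⟩
            have hxn : x ∉ (cs.take k).drop s :=
              fun hmem => (hdisj x hmem x (List.mem_singleton_self x)) rfl
            have hjlt : j < (s : Int) := hx1.mp hxn
            have hst : start ≤ (s : Int) := h2'.mp hn1
            rw [hS]; split <;> omega
          · intro hle
            have hjlt : j < (s : Int) := by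
              by_cases hc2 : start ≤ j
              · rw [hS, if_pos hc2] at hle; omega
              · rw [hS, if_neg hc2] at hle; omega
            have hst : start ≤ (s : Int) := by
              by_cases hc2 : start ≤ j
              · rw [hS, if_pos hc2] at hle; omega
              · rw [hS, if_neg hc2] at hle; omega
            refine List.nodup_append.mpr ⟨h2'.mpr hst, List.nodup_singleton x, ?_⟩
            intro a ha b hb
            rw [List.mem_singleton] at hb
            subst hb
            intro heq
            exact (hx1.mpr hjlt) (heq ▸ ha)
        · have hsk1 : s = k + 1 := by omega
          rw [hsk1, hdropk1]
          simp only [List.nodup_nil, true_iff]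
          omega
      -- the marker condition
      have hcond : ((k : Int) - S + 1 = 14) ↔ (13 ≤ k ∧ ((cs.take (k+1)).drop (k - 13)).Nodup) := by
        rcases Nat.lt_or_ge k 13 with h13 | h13
        · constructor
          · intro hc; omega
          · intro hc; omega
        · have hcast : ((k - 13 : Nat) : Int) = (k : Int) - 13 := by omega
          have hnd := new2 (k - 13) (by omega)
          rw [hcast] at hnd
          constructor
          · intro hc
            exact ⟨h13, hnd.mpr (by omega)⟩
          · intro hc
            have := hnd.mp hc.2
            omega
      rw [pvFirst, dif_pos h]
      by_cases hC : (k : Int) - S + 1 = 14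
      · rw [if_pos hC, if_pos (hcond.mp hC)]
      · rw [if_neg hC, if_neg (fun hh => hC (hcond.mpr hh))]
        have hcast : (k : Int) + 1 = ((k + 1 : Nat) : Int) := by push_cast; ring
        rw [hcast]
        exact ih (k+1) (last.insert x (k : Int)) S (by omega) hS0 new1 new2 (by omega)
    · rw [List.drop_eq_nil_of_le (Nat.le_of_not_lt h), pvFirst, dif_neg h]
      simp [pvB_loop, PySem.List.enumerate]

theorem pvB_eq (line : String) : find_message_marker_id_alt line = pvFirst line.toList 0 := by
  unfold find_message_marker_id_alt
  have h := pvB_main line.toList line.toList.length 0 PySem.Dict.empty 0 (by omega) (le_refl 0)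
    (by intro c s hs; interval_cases s; simp [PySem.Dict.getD_empty])
    (by intro s hs; interval_cases s; simp)
    (by norm_num)
  simpa using h

-- ===== VERDICT (by name: the statement is the Claim_ definition above) =====
theorem find_message_marker_id_spec : Claim_equal_find_message_marker_id := by
  intro line _
  unfold Spec_find_message_marker_id
  rw [pvA_eq, pvB_eq]
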